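-- pv_equiv track=rewrite | github.com/xiaoschannel/papertrail | pages/ingest/file_index.py | _group_containing
-- ===== SOURCE A (Python) =====
-- def _compute_groups(k: list[str], lnk: list[bool]) -> list[list[str]]:
--     if not k:
--         return []
--     groups: list[list[str]] = []
--     current = [k[0]]
--     for i in range(1, len(k)):
--         if i - 1 < len(lnk) and lnk[i - 1]:
--             current.append(k[i])
--         else:
--             groups.append(current)
--             current = [k[i]]
--     groups.append(current)
--     return groups
--
-- def _group_containing(idx: int, keys: list[str], links: list[bool]) -> tuple[int, list[int]]:
--     grps = _compute_groups(keys, links)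
--     for gi, g in enumerate(grps):
--         for i, k in enumerate(g):
--             if keys.index(k) == idx:
--                 indices = [keys.index(kk) for kk in g]
--                 return gi, indices
--     return -1, []
-- ===== SOURCE B (Python) =====
-- def _group_containing(idx: int, keys: list[str], links: list[bool]) -> tuple[int, list[int]]:
--     # first-occurrence index of each key, built once
--     first = {}
--     for i, k in enumerate(keys):
--         if k not in first:
--             first[k] = i
--     n = len(keys)
--     # first position whose key's first occurrence is idx
--     p = None
--     for i in range(n):
--         if first[keys[i]] == idx:
--             p = i
--             break
--     if p is None:
--         return -1, []
--     # expand to the contiguous group around p (positions j and j+1 are linked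
--     # when j < len(links) and links[j])
--     start = p
--     while start > 0 and start - 1 < len(links) and links[start - 1]:
--         start -= 1
--     end = p + 1
--     while end < n and end - 1 < len(links) and links[end - 1]:
--         end += 1
--     # group index = number of breaks strictly before start
--     gi = sum(1 for j in range(start) if not (j < len(links) and links[j]))
--     return gi, [first[keys[j]] for j in range(start, end)]
-- ===== Notes on version B (the rewrite author's own statement) =====
-- stated objective: faster
-- what changed: B replaces A's building of all groups followed by repeated quadratic keys.index scans with a one-pass first-occurrence dict, a single scan for the first matching position, and direct expansion of the contiguous group around that position.
import Mathlib
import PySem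

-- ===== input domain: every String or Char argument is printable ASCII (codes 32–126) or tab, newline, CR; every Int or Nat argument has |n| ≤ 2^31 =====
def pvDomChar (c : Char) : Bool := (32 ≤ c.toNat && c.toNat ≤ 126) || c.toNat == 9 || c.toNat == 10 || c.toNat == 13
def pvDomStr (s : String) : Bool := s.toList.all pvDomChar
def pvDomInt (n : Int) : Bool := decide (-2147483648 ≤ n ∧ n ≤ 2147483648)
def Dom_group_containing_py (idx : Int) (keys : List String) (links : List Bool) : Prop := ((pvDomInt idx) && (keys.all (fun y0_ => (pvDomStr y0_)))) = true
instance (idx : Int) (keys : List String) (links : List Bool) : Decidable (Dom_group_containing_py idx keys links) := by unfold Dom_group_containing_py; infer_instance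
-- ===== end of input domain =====

-- B replaces A's quadratic group-then-repeated-list.index search by a single-pass
-- first-occurrence dict plus direct expansion of the group around the hit (objective: faster).

-- ===== PORT A =====
-- _compute_groups: forward fold over range(1, len(k)); k[i]/lnk[i-1] are in range, ported with pyGetD defaults
def computeGroupsA (k : List String) (lnk : List Bool) : List (List String) :=
  match k with
  | [] => []
  | k0 :: _ =>
    let st := (PySem.List.pyRange 1 (k.length : Int) 1).foldl
      (fun (st : List (List String) × List String) i =>
        if (decide (i - 1 < (lnk.length : Int)) && PySem.List.pyGetD lnk (i - 1) false) = true then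
          (st.1, st.2 ++ [PySem.List.pyGetD k i ""])
        else
          (st.1 ++ [st.2], [PySem.List.pyGetD k i ""]))
      (([] : List (List String)), [k0])
    st.1 ++ [st.2]

-- keys.index(k): k always occurs in keys here, so the ValueError branch is unreachable; ported with getD 0
def idxOfA (keys : List String) (k : String) : Int :=
  ((PySem.List.index? keys k).getD 0 : Nat)

-- the two nested loops with early return: first group with a matching element wins
def searchA (idx : Int) (keys : List String) : List (List String) → Int → Int × List Int
  | [], _ => (-1, [])
  | g :: rest, gi =>
    if g.any (fun k => idxOfA keys k == idx) then (gi, g.map (fun kk => idxOfA keys kk))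
    else searchA idx keys rest (gi + 1)

def group_containing_py (idx : Int) (keys : List String) (links : List Bool) : Int × List Int :=
  searchA idx keys (computeGroupsA keys links) 0

-- ===== PORT B =====
-- first-occurrence index of every key, built in one pass
def firstDictB (keys : List String) : PySem.Dict String Int :=
  (PySem.List.enumerate keys).foldl
    (fun d p => if d.contains p.2 then d else d.insert p.2 p.1) PySem.Dict.empty

-- first position whose key's first occurrence equals idx (the for/break loop)
def findPB (first : PySem.Dict String Int) (idx : Int) (keys : List String) (i : Nat) : Option Nat :=
  if h : i < keys.length then
    (if first.getD (keys.getD i "") 0 == idx then some i else findPB first idx keys (i + 1))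
  else none
termination_by keys.length - i

-- while start > 0 and start-1 < len(links) and links[start-1]: start -= 1
def expandLB (links : List Bool) : Nat → Nat
  | 0 => 0
  | s + 1 => if (decide (s < links.length) && links.getD s false) = true then expandLB links s else s + 1

-- while end < n and end-1 < len(links) and links[end-1]: end += 1   (always called with 1 ≤ e)
def expandRB (links : List Bool) (n : Nat) (e : Nat) : Nat :=
  if h : e < n ∧ (e - 1 < links.length ∧ links.getD (e - 1) false = true) then
    expandRB links n (e + 1)
  else e
termination_by n - e
decreasing_by omega

-- gi = sum(1 for j in range(start) if not (j < len(links) and links[j]))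
def countBreaksB (links : List Bool) (s : Nat) : Int :=
  (List.range s).foldl
    (fun acc j => if (decide (j < links.length) && links.getD j false) = true then acc else acc + 1) 0

def group_containing_py_alt (idx : Int) (keys : List String) (links : List Bool) : Int × List Int :=
  let first := firstDictB keys
  match findPB first idx keys 0 with
  | none => (-1, [])
  | some p =>
    let s := expandLB links p
    let e := expandRB links keys.length (p + 1)
    (countBreaksB links s, (List.range' s (e - s)).map (fun j => first.getD (keys.getD j "") 0))

-- ===== PRECONDITION & SPEC =====
def Spec_group_containing_py (idx : Int) (keys : List String) (links : List Bool) (out : Int × List Int) : Prop := out = group_containing_py_alt idx keys links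
instance (idx : Int) (keys : List String) (links : List Bool) (out : Int × List Int) : Decidable (Spec_group_containing_py idx keys links out) := by unfold Spec_group_containing_py; infer_instance

-- ===== CLAIM (what is proved, stated in full; the proofs are below) =====
def Claim_equal_group_containing_py : Prop := ∀ (idx : Int) (keys : List String) (links : List Bool), Dom_group_containing_py idx keys links → Spec_group_containing_py idx keys links (group_containing_py idx keys links)

-- ===== LEMMAS AND PROOFS =====

-- proof-side abbreviations
def linkedP (links : List Bool) (j : Nat) : Bool := decide (j < links.length) && links.getD j false
def keyAt (keys : List String) (j : Nat) : String := keys.getD j ""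
def FF (keys : List String) (j : Nat) : Int := idxOfA keys (keyAt keys j)

-- structural rendering of A's grouping fold, by position
def runN (keys : List String) (links : List Bool) (i : Nat) (cur : List String) : List (List String) :=
  if i < keys.length then
    (if linkedP links (i - 1) = true then runN keys links (i + 1) (cur ++ [keyAt keys i])
     else cur :: runN keys links (i + 1) [keyAt keys i])
  else [cur]
termination_by keys.length - i

lemma foldA_run (keys : List String) (links : List Bool) :
    ∀ (m iN : Nat), keys.length - iN ≤ m → 1 ≤ iN → ∀ (gs : List (List String)) (cur : List String),
    (let st := (PySem.List.pyRange (iN : Int) (keys.length : Int) 1).foldl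
      (fun (st : List (List String) × List String) i =>
        if (decide (i - 1 < (links.length : Int)) && PySem.List.pyGetD links (i - 1) false) = true then
          (st.1, st.2 ++ [PySem.List.pyGetD keys i ""])
        else
          (st.1 ++ [st.2], [PySem.List.pyGetD keys i ""]))
      (gs, cur)
     st.1 ++ [st.2]) = gs ++ runN keys links iN cur := by
  intro m
  induction m with
  | zero =>
    intro iN hk h1 gs cur
    have hge : ¬ iN < keys.length := by omega
    rw [PySem.List.pyRange_one_eq_nil (by exact_mod_cast Nat.le_of_not_lt hge)]
    rw [runN, if_neg hge]
    rfl
  | succ m ih =>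
    intro iN hk h1 gs cur
    by_cases hlt : iN < keys.length
    · rw [PySem.List.pyRange_one_cons (by exact_mod_cast hlt)]
      simp only [List.foldl_cons]
      have hcast : (iN : Int) - 1 = ((iN - 1 : Nat) : Int) := by omega
      have hcond : (decide ((iN : Int) - 1 < (links.length : Int)) &&
          PySem.List.pyGetD links ((iN : Int) - 1) false) = linkedP links (iN - 1) := by
        rw [hcast, PySem.List.pyGetD_natCast]
        simp [linkedP]
      have hkey : PySem.List.pyGetD keys (iN : Int) "" = keyAt keys iN := by
        rw [PySem.List.pyGetD_natCast]; rfl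
      have hsucc : (iN : Int) + 1 = ((iN + 1 : Nat) : Int) := by push_cast; ring
      rw [runN, if_pos hlt]
      by_cases hl : linkedP links (iN - 1) = true
      · rw [if_pos hl]
        rw [if_pos (by rw [hcond]; exact hl)]
        simp only [hkey, hsucc]
        exact ih (iN + 1) (by omega) (by omega) gs (cur ++ [keyAt keys iN])
      · rw [if_neg hl]
        rw [if_neg (by rw [hcond]; exact hl)]
        simp only [hkey, hsucc]
        rw [ih (iN + 1) (by omega) (by omega) (gs ++ [cur]) [keyAt keys iN]]
        simp
    · rw [PySem.List.pyRange_one_eq_nil (by exact_mod_cast Nat.le_of_not_lt hlt)]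
      rw [runN, if_neg hlt]
      rfl

lemma computeGroupsA_eq_runN (keys : List String) (links : List Bool) (h : keys ≠ []) :
    computeGroupsA keys links = runN keys links 1 [keyAt keys 0] := by
  match keys with
  | k0 :: rest =>
    show ((PySem.List.pyRange 1 ((k0 :: rest).length : Int) 1).foldl _ ([], [k0])).1 ++ _ = _
    have := foldA_run (k0 :: rest) links ((k0 :: rest).length - 1) 1 le_rfl le_rfl [] [k0]
    simp only at this
    rw [show ((1 : Nat) : Int) = (1 : Int) from rfl] at this
    rw [this]
    rfl

lemma expandR_ge (links : List Bool) (n i : Nat) : i ≤ expandRB links n i := by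
  unfold expandRB
  split
  · have := expandR_ge links n (i + 1)
    omega
  · omega
termination_by n - i
decreasing_by omega

lemma expandR_le (links : List Bool) (n i : Nat) (h : i ≤ n) : expandRB links n i ≤ n := by
  unfold expandRB
  split
  · rename_i hc
    exact expandR_le links n (i + 1) (by omega)
  · exact h
termination_by n - i
decreasing_by omega

lemma linkedP_true (links : List Bool) (j : Nat) :
    linkedP links j = true ↔ (j < links.length ∧ links.getD j false = true) := by
  simp [linkedP]

lemma expandR_linked (links : List Bool) (n i : Nat) :
    ∀ j, i ≤ j → j < expandRB links n i → j < n ∧ linkedP links (j - 1) = true := by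
  intro j hij hje
  unfold expandRB at hje
  split at hje
  · rename_i hc
    rcases Nat.eq_or_lt_of_le hij with h | h
    · subst h
      exact ⟨hc.1, (linkedP_true _ _).mpr ⟨hc.2.1, hc.2.2⟩⟩
    · exact expandR_linked links n (i + 1) j h hje
  · omega
termination_by n - i
decreasing_by omega

lemma expandR_stop (links : List Bool) (n i : Nat) :
    ¬ (expandRB links n i < n ∧ linkedP links (expandRB links n i - 1) = true) := by
  unfold expandRB
  split
  · exact expandR_stop links n (i + 1)
  · rename_i h
    intro hcontra
    exact h ⟨hcontra.1, (linkedP_true _ _).mp hcontra.2⟩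
termination_by n - i
decreasing_by omega

lemma expandR_eq_of_linked (links : List Bool) (n : Nat) :
    ∀ (k m e : Nat), e - m ≤ k → m ≤ e →
    (∀ j, m ≤ j → j < e → j < n ∧ linkedP links (j - 1) = true) →
    ¬ (e < n ∧ linkedP links (e - 1) = true) →
    expandRB links n m = e := by
  intro k
  induction k with
  | zero =>
    intro m e hk hme hl hstop
    have : m = e := by omega
    subst this
    rw [expandRB, dif_neg]
    intro h
    exact hstop ⟨h.1, (linkedP_true _ _).mpr h.2⟩
  | succ k ih =>
    intro m e hk hme hl hstop
    rcases Nat.eq_or_lt_of_le hme with h | h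
    · subst h
      rw [expandRB, dif_neg]
      intro h
      exact hstop ⟨h.1, (linkedP_true _ _).mpr h.2⟩
    · have hm := hl m le_rfl h
      have hm2 := (linkedP_true _ _).mp hm.2
      rw [expandRB, dif_pos ⟨hm.1, hm2.1, hm2.2⟩]
      exact ih (m + 1) e (by omega) (by omega) (fun j hj1 hj2 => hl j (by omega) hj2) hstop

lemma expandL_stop (links : List Bool) (b : Nat)
    (hstart : b = 0 ∨ linkedP links (b - 1) = false) : expandLB links b = b := by
  cases b with
  | zero => rfl
  | succ s =>
    rw [expandLB]
    rcases hstart with h | h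
    · omega
    · simp only [linkedP, Nat.add_sub_cancel] at h
      rw [if_neg (by simp only [h]; simp)]

lemma expandL_eq (links : List Bool) (b : Nat) (hstart : b = 0 ∨ linkedP links (b - 1) = false) :
    ∀ (k p : Nat), p - b ≤ k → b ≤ p →
    (∀ j, b < j → j ≤ p → linkedP links (j - 1) = true) →
    expandLB links p = b := by
  intro k
  induction k with
  | zero =>
    intro p hk hbp hl
    have : p = b := by omega
    subst this
    exact expandL_stop links p hstart
  | succ k ih =>
    intro p hk hbp hl
    rcases Nat.eq_or_lt_of_le hbp with h | h
    · subst h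
      exact expandL_stop links b hstart
    · obtain ⟨s, rfl⟩ : ∃ s, p = s + 1 := ⟨p - 1, by omega⟩
      have hp := hl (s + 1) h le_rfl
      simp only [linkedP, Nat.add_sub_cancel] at hp
      rw [expandLB, if_pos hp]
      exact ih s (by omega) (by omega) (fun j hj1 hj2 => hl j hj1 (by omega))

lemma countBreaks_succ (links : List Bool) (s : Nat) :
    countBreaksB links (s + 1)
      = countBreaksB links s + (if linkedP links s = true then 0 else 1) := by
  unfold countBreaksB
  rw [List.range_succ, List.foldl_append]
  simp only [List.foldl_cons, List.foldl_nil, linkedP]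
  split <;> simp

lemma countBreaks_eq_of_linked (links : List Bool) (b : Nat) :
    ∀ (k m : Nat), m - b ≤ k → b ≤ m →
    (∀ j, b ≤ j → j < m → linkedP links j = true) →
    countBreaksB links m = countBreaksB links b := by
  intro k
  induction k with
  | zero =>
    intro m hk hbm _
    have : m = b := by omega
    rw [this]
  | succ k ih =>
    intro m hk hbm hl
    rcases Nat.eq_or_lt_of_le hbm with h | h
    · rw [← h]
    · obtain ⟨s, rfl⟩ : ∃ s, m = s + 1 := ⟨m - 1, by omega⟩
      rw [countBreaks_succ, if_pos (hl s (by omega) (by omega))]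
      rw [ih s (by omega) (by omega) (fun j h1 h2 => hl j h1 (by omega))]
      ring

lemma countBreaks_step (links : List Bool) (b e : Nat) (hbe : b < e)
    (hlink : ∀ j, b < j → j < e → linkedP links (j - 1) = true)
    (hbrk : linkedP links (e - 1) = false) :
    countBreaksB links e = countBreaksB links b + 1 := by
  obtain ⟨s, rfl⟩ : ∃ s, e = s + 1 := ⟨e - 1, by omega⟩
  rw [countBreaks_succ]
  simp only [Nat.add_sub_cancel] at hbrk
  rw [if_neg (by simp [hbrk])]
  rw [countBreaks_eq_of_linked links b (s - b) s le_rfl (by omega)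
    (fun j h1 h2 => by simpa using hlink (j + 1) (by omega) (by omega))]

lemma firstFold_get? (k : String) :
    ∀ (keys : List String) (s : Int) (d : PySem.Dict String Int),
    ((PySem.List.enumerate keys s).foldl
      (fun d p => if d.contains p.2 then d else d.insert p.2 p.1) d).get? k
    = if d.contains k then d.get? k else (PySem.List.index? keys k).map (fun j => s + (j : Int)) := by
  intro keys
  induction keys with
  | nil =>
    intro s d
    simp only [PySem.List.enumerate_nil, List.foldl_nil]
    rw [PySem.List.index?_eq_idxOf?]
    simp only [List.idxOf?_nil]
    split
    · rfl
    · rename_i h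
      exact (PySem.Dict.get?_eq_none_iff_contains d k).mpr (by simpa using h)
  | cons x xs ih =>
    intro s d
    rw [PySem.List.enumerate_cons, List.foldl_cons]
    by_cases hx : d.contains x = true
    · rw [if_pos hx, ih (s + 1) d]
      by_cases hk : d.contains k = true
      · rw [if_pos hk, if_pos hk]
      · have hxk : x ≠ k := fun h => hk (h ▸ hx)
        rw [if_neg hk, if_neg hk, PySem.List.index?_cons_of_ne xs hxk]
        cases PySem.List.index? xs k
        · simp
        · simp
          ring
    · rw [if_neg hx, ih (s + 1) (d.insert x s)]
      by_cases hxk : x = k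
      · subst hxk
        rw [if_pos (PySem.Dict.contains_insert_self d x s)]
        rw [PySem.Dict.get?_insert_self]
        rw [if_neg hx, PySem.List.index?_cons_self]
        simp
      · have hcont : (d.insert x s).contains k = d.contains k := by
          rw [PySem.Dict.contains_insert]
          simp [show (k == x) = false by simp [Ne.symm hxk]]
        rw [hcont]
        by_cases hk : d.contains k = true
        · rw [if_pos hk, if_pos hk]
          exact PySem.Dict.get?_insert_of_ne d (s : Int) (Ne.symm hxk)
        · rw [if_neg hk, if_neg hk, PySem.List.index?_cons_of_ne xs hxk]
          cases PySem.List.index? xs k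
          · simp
          · simp
            ring

lemma FB (keys : List String) (j : Nat) (hj : j < keys.length) :
    (firstDictB keys).getD (keys.getD j "") 0 = FF keys j := by
  unfold firstDictB FF idxOfA keyAt
  rw [PySem.Dict.getD_eq_get?_getD, firstFold_get?]
  rw [if_neg (by simp [PySem.Dict.contains_empty])]
  have hmem : keys.getD j "" ∈ keys := by
    rw [List.getD_eq_getElem keys "" hj]
    exact List.getElem_mem hj
  obtain ⟨m, hm⟩ := Option.isSome_iff_exists.mp ((PySem.List.index?_isSome_iff _ _).mpr hmem)
  rw [hm]
  simp

lemma findP_oob (first : PySem.Dict String Int) (idx : Int) (keys : List String) (i : Nat)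
    (h : ¬ i < keys.length) : findPB first idx keys i = none := by
  rw [findPB]
  simp [h]

lemma findP_step (first : PySem.Dict String Int) (idx : Int) (keys : List String) (i : Nat)
    (h : i < keys.length) :
    findPB first idx keys i
      = if first.getD (keys.getD i "") 0 == idx then some i else findPB first idx keys (i + 1) := by
  rw [findPB]
  simp [h]

lemma findP_skip (first : PySem.Dict String Int) (idx : Int) (keys : List String) :
    ∀ (k b e : Nat), e - b ≤ k → b ≤ e →
    (∀ j, b ≤ j → j < e → ¬ (first.getD (keys.getD j "") 0 == idx) = true) →
    findPB first idx keys b = findPB first idx keys e := by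
  intro k
  induction k with
  | zero =>
    intro b e hk hbe _
    have : b = e := by omega
    subst this; rfl
  | succ k ih =>
    intro b e hk hbe hno
    rcases Nat.eq_or_lt_of_le hbe with h | h
    · subst h; rfl
    · by_cases hb : b < keys.length
      · rw [findP_step _ _ _ _ hb]
        rw [if_neg (hno b le_rfl h)]
        exact ih (b + 1) e (by omega) (by omega) (fun j hj1 hj2 => hno j (by omega) hj2)
      · rw [findP_oob _ _ _ _ hb, findP_oob]
        omega

lemma findP_found (first : PySem.Dict String Int) (idx : Int) (keys : List String) :
    ∀ (k b p : Nat), keys.length - b ≤ k → findPB first idx keys b = some p →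
    b ≤ p ∧ p < keys.length ∧ (first.getD (keys.getD p "") 0 == idx) = true ∧
      (∀ j, b ≤ j → j < p → ¬ (first.getD (keys.getD j "") 0 == idx) = true) := by
  intro k
  induction k with
  | zero =>
    intro b p hk hfind
    rw [findP_oob _ _ _ _ (by omega)] at hfind
    exact absurd hfind (by simp)
  | succ k ih =>
    intro b p hk hfind
    by_cases hb : b < keys.length
    · rw [findP_step _ _ _ _ hb] at hfind
      split at hfind
      · rename_i hc
        cases hfind
        refine ⟨le_rfl, hb, ?_, fun j h1 h2 => by omega⟩
        simpa [List.getD] using hc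
      · rename_i hc
        obtain ⟨h1, h2, h3, h4⟩ := ih (b + 1) p (by omega) hfind
        refine ⟨by omega, h2, h3, fun j hj1 hj2 => ?_⟩
        rcases Nat.eq_or_lt_of_le hj1 with h | h
        · subst h
          simpa [List.getD] using hc
        · exact h4 j h hj2
    · rw [findP_oob _ _ _ _ hb] at hfind
      exact absurd hfind (by simp)

lemma findP_none (first : PySem.Dict String Int) (idx : Int) (keys : List String) :
    ∀ (k b : Nat), keys.length - b ≤ k → findPB first idx keys b = none →
    ∀ j, b ≤ j → j < keys.length → ¬ (first.getD (keys.getD j "") 0 == idx) = true := by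
  intro k
  induction k with
  | zero =>
    intro b hk _ j hj1 hj2
    omega
  | succ k ih =>
    intro b hk hfind j hj1 hj2
    have hb : b < keys.length := by omega
    rw [findP_step _ _ _ _ hb] at hfind
    split at hfind
    · exact absurd hfind (by simp)
    · rename_i hc
      rcases Nat.eq_or_lt_of_le hj1 with h | h
      · subst h
        simpa [List.getD] using hc
      · exact ih (b + 1) (by omega) hfind j h hj2

lemma runN_seg (keys : List String) (links : List Bool) :
    ∀ (k i : Nat) (cur : List String), keys.length - i ≤ k →
    runN keys links i cur
      = (cur ++ (List.range' i (expandRB links keys.length i - i)).map (keyAt keys)) ::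
        (if expandRB links keys.length i < keys.length then
          runN keys links (expandRB links keys.length i + 1)
            [keyAt keys (expandRB links keys.length i)]
        else []) := by
  intro k
  induction k with
  | zero =>
    intro i cur hk
    have hin : ¬ i < keys.length := by omega
    rw [runN, if_neg hin]
    rw [expandRB, dif_neg (by intro h; exact hin (by omega))]
    simp [hin]
  | succ k ih =>
    intro i cur hk
    by_cases hin : i < keys.length
    · by_cases hl : linkedP links (i - 1) = true
      · have hl' := (linkedP_true _ _).mp hl
        have he : expandRB links keys.length i = expandRB links keys.length (i + 1) := by
          rw [expandRB, dif_pos ⟨hin, hl'.1, hl'.2⟩]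
        have hge : i + 1 ≤ expandRB links keys.length (i + 1) := expandR_ge _ _ _
        rw [runN, if_pos hin, if_pos hl, ih (i + 1) _ (by omega), he]
        congr 1
        rw [List.append_assoc]
        congr 1
        have : expandRB links keys.length (i + 1) - i
            = (expandRB links keys.length (i + 1) - (i + 1)) + 1 := by omega
        rw [this, List.range'_succ]
        simp
      · have he : expandRB links keys.length i = i := by
          rw [expandRB, dif_neg]
          intro h
          exact absurd ((linkedP_true _ _).mpr ⟨h.2.1, h.2.2⟩) (by simp [hl])
        rw [runN, if_pos hin, if_neg hl, he]
        simp [hin]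
    · rw [runN, if_neg hin]
      rw [expandRB, dif_neg (by intro h; exact hin (by omega))]
      simp [hin]

-- the central segment-by-segment equivalence
lemma main_seg (idx : Int) (keys : List String) (links : List Bool) :
    ∀ (k b i : Nat) (cur : List String) (gi : Int), keys.length - b ≤ k →
    b < i → i ≤ keys.length →
    cur = (List.range' b (i - b)).map (keyAt keys) →
    (∀ j, b < j → j < i → linkedP links (j - 1) = true) →
    (b = 0 ∨ linkedP links (b - 1) = false) →
    gi = countBreaksB links b →
    searchA idx keys (runN keys links i cur) gi
      = (match findPB (firstDictB keys) idx keys b with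
        | none => (-1, [])
        | some p =>
          (countBreaksB links (expandLB links p),
            (List.range' (expandLB links p) (expandRB links keys.length (p + 1) - expandLB links p)).map
              (fun j => (firstDictB keys).getD (keys.getD j "") 0))) := by
  intro k
  induction k with
  | zero =>
    intro b i cur gi hk hbi hin hcur hlink hstart hgi
    omega
  | succ k ih =>
    intro b i cur gi hk hbi hin hcur hlink hstart hgi
    have hie : i ≤ expandRB links keys.length i := expandR_ge _ _ _
    have hen : expandRB links keys.length i ≤ keys.length := expandR_le _ _ _ hin
    set e := expandRB links keys.length i with he
    have hseglink : ∀ j, b < j → j < e → linkedP links (j - 1) = true := by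
      intro j h1 h2
      by_cases hji : j < i
      · exact hlink j h1 hji
      · exact (expandR_linked links keys.length i j (by omega) h2).2
    have hstop : ¬ (e < keys.length ∧ linkedP links (e - 1) = true) :=
      expandR_stop links keys.length i
    rw [runN_seg keys links (keys.length - i) i cur le_rfl, ← he]
    have hgroup : cur ++ (List.range' i (e - i)).map (keyAt keys)
        = (List.range' b (e - b)).map (keyAt keys) := by
      rw [hcur, ← List.map_append]
      have hr := @List.range'_append b (i - b) (e - i) 1
      simp only [one_mul] at hr
      rw [show b + (i - b) = i from by omega] at hr
      rw [hr, show i - b + (e - i) = e - b from by omega]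
    rw [hgroup]
    simp only [searchA]
    cases hfind : findPB (firstDictB keys) idx keys b with
    | none =>
      have hno := findP_none (firstDictB keys) idx keys keys.length b (by omega) hfind
      have hanyf : ((List.range' b (e - b)).map (keyAt keys)).any
          (fun k => idxOfA keys k == idx) = false := by
        rw [List.any_map, List.any_eq_false]
        intro j hj
        rw [List.mem_range'_1] at hj
        have hjn : j < keys.length := by omega
        have hc := hno j (by omega) hjn
        rw [FB keys j hjn] at hc
        simpa [FF] using hc
      rw [if_neg (by simp [hanyf])]
      by_cases hen' : e < keys.length
      · have hbrk : linkedP links (e - 1) = false := by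
          cases h : linkedP links (e - 1)
          · rfl
          · exact absurd ⟨hen', h⟩ hstop
        rw [if_pos hen']
        rw [ih e (e + 1) [keyAt keys e] (gi + 1) (by omega) (by omega) (by omega)
          (by rw [show e + 1 - e = 1 from by omega, List.range'_one]; rfl)
          (fun j h1 h2 => by omega) (Or.inr hbrk)
          (by rw [hgi, countBreaks_step links b e (by omega) hseglink hbrk])]
        have hskip : findPB (firstDictB keys) idx keys e = none := by
          rw [← findP_skip (firstDictB keys) idx keys (e - b) b e le_rfl (by omega)
            (fun j h1 h2 => hno j h1 (by omega))]
          exact hfind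
        rw [hskip]
      · rw [if_neg hen']
        simp [searchA]
    | some p =>
      obtain ⟨hbp, hpn, hcondp, hprev⟩ :=
        findP_found (firstDictB keys) idx keys keys.length b p (by omega) hfind
      by_cases hpe : p < e
      · have hFFp : FF keys p = idx := by
          rw [FB keys p hpn] at hcondp
          simpa using hcondp
        have hany : ((List.range' b (e - b)).map (keyAt keys)).any
            (fun k => idxOfA keys k == idx) = true := by
          rw [List.any_map, List.any_eq_true]
          refine ⟨p, by rw [List.mem_range'_1]; omega, ?_⟩
          show (idxOfA keys (keyAt keys p) == idx) = true
          simp [show idxOfA keys (keyAt keys p) = idx from hFFp]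
        rw [if_pos hany]
        have hL : expandLB links p = b :=
          expandL_eq links b hstart (p - b) p le_rfl hbp
            (fun j h1 h2 => hseglink j h1 (by omega))
        have hR : expandRB links keys.length (p + 1) = e :=
          expandR_eq_of_linked links keys.length (e - (p + 1)) (p + 1) e le_rfl (by omega)
            (fun j h1 h2 => ⟨by omega, hseglink j (by omega) h2⟩) hstop
        show _ = (countBreaksB links (expandLB links p),
          (List.range' (expandLB links p)
            (expandRB links keys.length (p + 1) - expandLB links p)).map
            (fun j => (firstDictB keys).getD (keys.getD j "") 0))
        rw [hL, hR, hgi]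
        congr 1
        rw [List.map_map]
        refine List.map_congr_left ?_
        intro j hj
        rw [List.mem_range'_1] at hj
        exact (FB keys j (by omega)).symm
      · have hanyf : ((List.range' b (e - b)).map (keyAt keys)).any
            (fun k => idxOfA keys k == idx) = false := by
          rw [List.any_map, List.any_eq_false]
          intro j hj
          rw [List.mem_range'_1] at hj
          have hjn : j < keys.length := by omega
          have hc := hprev j (by omega) (by omega)
          rw [FB keys j hjn] at hc
          simpa [FF] using hc
        rw [if_neg (by simp [hanyf])]
        have hen' : e < keys.length := by omega
        have hbrk : linkedP links (e - 1) = false := by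
          cases h : linkedP links (e - 1)
          · rfl
          · exact absurd ⟨hen', h⟩ hstop
        rw [if_pos hen']
        rw [ih e (e + 1) [keyAt keys e] (gi + 1) (by omega) (by omega) (by omega)
          (by rw [show e + 1 - e = 1 from by omega, List.range'_one]; rfl)
          (fun j h1 h2 => by omega) (Or.inr hbrk)
          (by rw [hgi, countBreaks_step links b e (by omega) hseglink hbrk])]
        have hskip : findPB (firstDictB keys) idx keys e = some p := by
          rw [← findP_skip (firstDictB keys) idx keys (e - b) b e le_rfl (by omega)
            (fun j h1 h2 => hprev j h1 (by omega))]
          exact hfind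
        rw [hskip]

-- ===== VERDICT (by name: the statement is the Claim_ definition above) =====
theorem group_containing_py_spec : Claim_equal_group_containing_py := by
  intro idx keys links _
  unfold Spec_group_containing_py group_containing_py group_containing_py_alt
  match hk : keys with
  | [] => simp [computeGroupsA, findPB, searchA]
  | k0 :: rest =>
    rw [computeGroupsA_eq_runN _ _ (by simp)]
    rw [main_seg idx (k0 :: rest) links ((k0 :: rest).length) 0 1 [keyAt (k0 :: rest) 0] 0
      (by omega) (by omega) (by simp) (by simp [List.range']) (by omega)
      (Or.inl rfl) (by simp [countBreaksB])]
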